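-- pv_equiv track=rewrite | github.com/djrrb/Bungee | venv/lib/python3.10/site-packages/glyphsLib/builder/names.py | build_stylemap_names
-- ===== SOURCE A (Python) =====
-- from collections import deque
--
-- def build_stylemap_names(
--     family_name, style_name, is_bold=False, is_italic=False, linked_style=None
-- ):
--     """Build UFO `styleMapFamilyName` and `styleMapStyleName` based on the
--     family and style names, and the entries in the "Style Linking" section
--     of the "Instances" tab in the "Font Info".
--
--     The value of `styleMapStyleName` can be either "regular", "bold", "italic"
--     or "bold italic", depending on the values of `is_bold` and `is_italic`.
--
--     The `styleMapFamilyName` is a combination of the `family_name` and the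
--     `linked_style`.
--
--     If `linked_style` is unset or set to 'Regular', the linked style is equal
--     to the style_name with the last occurrences of the strings 'Regular',
--     'Bold' and 'Italic' stripped from it.
--     """
--
--     styleMapStyleName = (
--         " ".join(
--             s for s in ("bold" if is_bold else "", "italic" if is_italic else "") if s
--         )
--         or "regular"
--     )
--     if not linked_style or linked_style == "Regular":
--         linked_style = _get_linked_style(style_name, is_bold, is_italic)
--     if linked_style:
--         styleMapFamilyName = (family_name or "") + " " + linked_style
--     else:
--         styleMapFamilyName = family_name
--     return styleMapFamilyName, styleMapStyleName
--
-- def _get_linked_style(style_name, is_bold, is_italic):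
--     # strip last occurrence of 'Regular', 'Bold', 'Italic' from style_name
--     # depending on the values of is_bold and is_italic
--     linked_style = deque()
--     is_regular = not (is_bold or is_italic)
--     for part in reversed(style_name.split()):
--         if part == "Regular" and is_regular:
--             is_regular = False
--         elif part == "Bold" and is_bold:
--             is_bold = False
--         elif part == "Italic" and is_italic:
--             is_italic = False
--         else:
--             linked_style.appendleft(part)
--     return " ".join(linked_style)
-- ===== SOURCE B (Python) =====
-- def build_stylemap_names(
--     family_name, style_name, is_bold=False, is_italic=False, linked_style=None
-- ):
--     styleMapStyleName = (
--         "bold italic" if is_bold and is_italic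
--         else "bold" if is_bold
--         else "italic" if is_italic
--         else "regular"
--     )
--     if not linked_style or linked_style == "Regular":
--         if is_bold or is_italic:
--             keywords = (["Bold"] if is_bold else []) + (["Italic"] if is_italic else [])
--         else:
--             keywords = ["Regular"]
--         rev = style_name.split()[::-1]
--         for kw in keywords:
--             if kw in rev:
--                 rev.remove(kw)  # first in rev = last occurrence in the style name
--         linked_style = " ".join(reversed(rev))
--     if linked_style:
--         styleMapFamilyName = (family_name or "") + " " + linked_style
--     else:
--         styleMapFamilyName = family_name
--     return styleMapFamilyName, styleMapStyleName
-- ===== Notes on version B (the rewrite author's own statement) =====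
-- stated objective: simpler
-- what changed: Replaces A's single reverse scan over tokens with three mutable stripping flags by a keyword-driven loop: for each active keyword ('Regular' when neither bold nor italic, else 'Bold'/'Italic'), remove its last occurrence from the token list via list.remove on the reversed list; the style-name branch becomes a direct 4-way conditional instead of join-over-filtered-generator.
-- outside the precondition, e.g. on build_stylemap_names(None, '', False, False, None): A returns (None, 'regular'), B returns (None, 'regular')
import Mathlib
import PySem

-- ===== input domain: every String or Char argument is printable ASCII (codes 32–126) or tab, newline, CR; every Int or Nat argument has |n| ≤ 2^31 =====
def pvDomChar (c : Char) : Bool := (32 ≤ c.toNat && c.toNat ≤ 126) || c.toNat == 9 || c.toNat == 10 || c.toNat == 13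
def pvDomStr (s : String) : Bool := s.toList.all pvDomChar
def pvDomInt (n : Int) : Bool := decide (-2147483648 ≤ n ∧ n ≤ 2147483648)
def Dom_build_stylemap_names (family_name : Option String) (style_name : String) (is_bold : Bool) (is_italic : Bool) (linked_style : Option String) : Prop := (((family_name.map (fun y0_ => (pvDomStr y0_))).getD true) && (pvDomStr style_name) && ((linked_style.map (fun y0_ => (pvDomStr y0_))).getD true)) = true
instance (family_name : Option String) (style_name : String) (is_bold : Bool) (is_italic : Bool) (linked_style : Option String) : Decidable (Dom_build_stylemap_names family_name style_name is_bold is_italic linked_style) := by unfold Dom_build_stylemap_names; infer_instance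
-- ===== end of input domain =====

-- B (simpler): drops A's one-pass flag machine over the tokens and instead removes, per active
-- keyword, its last occurrence from the token list (erase on the reversed list); equivalence of
-- the RETURN value is proved on Pre_ (where Python A returns a pair of strings).

-- ===== PORT A =====
-- state of A's loop: (deque as list, is_regular, is_bold, is_italic); appendleft = cons
def pvGLSStep (s : List String × Bool × Bool × Bool) (part : String) : List String × Bool × Bool × Bool :=
  if part == "Regular" && s.2.1 then (s.1, false, s.2.2.1, s.2.2.2)
  else if part == "Bold" && s.2.2.1 then (s.1, s.2.1, false, s.2.2.2)
  else if part == "Italic" && s.2.2.2 then (s.1, s.2.1, s.2.2.1, false)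
  else (part :: s.1, s.2.1, s.2.2.1, s.2.2.2)

def pvGetLinkedStyle (style_name : String) (is_bold is_italic : Bool) : String :=
  PySem.Str.join " "
    ((PySem.Str.split₀ style_name).reverse.foldl pvGLSStep
      ([], !(is_bold || is_italic), is_bold, is_italic)).1

def build_stylemap_names (family_name : Option String) (style_name : String) (is_bold : Bool) (is_italic : Bool) (linked_style : Option String) : String × String :=
  let j := PySem.Str.join " "
    (([(if is_bold then "bold" else ""), (if is_italic then "italic" else "")]).filter (fun s => s != ""))
  let styleMapStyleName := if j != "" then j else "regular"
  let ls0 := linked_style.getD ""      -- "not linked_style": None or "" are falsy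
  let ls := if ls0 == "" || ls0 == "Regular" then pvGetLinkedStyle style_name is_bold is_italic else ls0
  -- Pre_ guarantees family_name is some _ when ls = "" (else Python returns None, not a str)
  let styleMapFamilyName := if ls != "" then (family_name.getD "") ++ " " ++ ls else family_name.getD ""
  (styleMapFamilyName, styleMapStyleName)

-- ===== PORT B =====
-- 'if kw in rev: rev.remove(kw)'
def pvRemoveKw (rev : List String) (kw : String) : List String :=
  if kw ∈ rev then (PySem.List.remove? rev kw).getD rev else rev

def build_stylemap_names_alt (family_name : Option String) (style_name : String) (is_bold : Bool) (is_italic : Bool) (linked_style : Option String) : String × String :=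
  let styleMapStyleName :=
    if is_bold && is_italic then "bold italic"
    else if is_bold then "bold" else if is_italic then "italic" else "regular"
  let ls0 := linked_style.getD ""
  let ls :=
    if ls0 == "" || ls0 == "Regular" then
      let keywords := if is_bold || is_italic then
          (if is_bold then ["Bold"] else []) ++ (if is_italic then ["Italic"] else [])
        else ["Regular"]
      -- parts[::-1] (PySem.List.slice? … (-1) = reverse)
      let rev := (PySem.List.slice? (PySem.Str.split₀ style_name) none none (-1)).getD []
      PySem.Str.join " " (keywords.foldl pvRemoveKw rev).reverse
    else ls0
  let styleMapFamilyName := if ls != "" then (family_name.getD "") ++ " " ++ ls else family_name.getD ""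
  (styleMapFamilyName, styleMapStyleName)

-- ===== PRECONDITION & SPEC =====
-- Pre_ excludes exactly the inputs where Python A returns None (not a str) as styleMapFamilyName:
-- family_name is None and the linked style comes out empty (linked_style unset/""/"Regular" and
-- every token of style_name is a distinct strippable keyword, so all tokens get stripped).
def Pre_build_stylemap_names (family_name : Option String) (style_name : String) (is_bold : Bool) (is_italic : Bool) (linked_style : Option String) : Prop :=
  family_name ≠ none ∨
  ¬ ((linked_style.getD "" = "" ∨ linked_style.getD "" = "Regular") ∧
     (PySem.Str.split₀ style_name).Nodup ∧
     ∀ p ∈ PySem.Str.split₀ style_name,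
       p ∈ (if is_bold || is_italic then
              (if is_bold then ["Bold"] else []) ++ (if is_italic then ["Italic"] else [])
            else ["Regular"]))
instance (family_name : Option String) (style_name : String) (is_bold : Bool) (is_italic : Bool) (linked_style : Option String) : Decidable (Pre_build_stylemap_names family_name style_name is_bold is_italic linked_style) := by unfold Pre_build_stylemap_names; infer_instance

def pvWitness_build_stylemap_names : Option String × String × Bool × Bool × Option String :=
  (some "My Family", "Bold Condensed", true, false, none)

def Spec_build_stylemap_names (family_name : Option String) (style_name : String) (is_bold : Bool) (is_italic : Bool) (linked_style : Option String) (out : String × String) : Prop := out = build_stylemap_names_alt family_name style_name is_bold is_italic linked_style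
instance (family_name : Option String) (style_name : String) (is_bold : Bool) (is_italic : Bool) (linked_style : Option String) (out : String × String) : Decidable (Spec_build_stylemap_names family_name style_name is_bold is_italic linked_style out) := by unfold Spec_build_stylemap_names; infer_instance

-- ===== CLAIM (what is proved, stated in full; the proofs are below) =====
def Claim_equal_build_stylemap_names : Prop := ∀ (family_name : Option String) (style_name : String) (is_bold : Bool) (is_italic : Bool) (linked_style : Option String), Dom_build_stylemap_names family_name style_name is_bold is_italic linked_style → Pre_build_stylemap_names family_name style_name is_bold is_italic linked_style → Spec_build_stylemap_names family_name style_name is_bold is_italic linked_style (build_stylemap_names family_name style_name is_bold is_italic linked_style)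

-- ===== LEMMAS AND PROOFS =====

-- elements kept by A's scan over the reversed token list, in scan order
def keptA : List String → Bool → Bool → Bool → List String
  | [], _, _, _ => []
  | p :: rest, reg, b, i =>
    if p == "Regular" && reg then keptA rest false b i
    else if p == "Bold" && b then keptA rest reg false i
    else if p == "Italic" && i then keptA rest reg b false
    else p :: keptA rest reg b i

theorem foldl_pvGLSStep (r : List String) : ∀ (acc : List String) (reg b i : Bool),
    (r.foldl pvGLSStep (acc, reg, b, i)).1 = (keptA r reg b i).reverse ++ acc := by
  induction r with
  | nil => intro acc reg b i; simp [keptA]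
  | cons p rest ih =>
    intro acc reg b i
    simp only [List.foldl_cons, pvGLSStep, keptA]
    split_ifs <;> simp [ih]

theorem keptA_all_false (r : List String) : keptA r false false false = r := by
  induction r with
  | nil => rfl
  | cons p rest ih => simp [keptA, ih]

theorem keptA_regular (r : List String) : keptA r true false false = r.erase "Regular" := by
  induction r with
  | nil => rfl
  | cons p rest ih =>
    by_cases h : p = "Regular"
    · simp [keptA, h, keptA_all_false]
    · simp [keptA, h, ih]

theorem keptA_bold (r : List String) : keptA r false true false = r.erase "Bold" := by
  induction r with
  | nil => rfl
  | cons p rest ih =>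
    by_cases h : p = "Bold"
    · simp [keptA, h, keptA_all_false]
    · simp [keptA, h, ih]

theorem keptA_italic (r : List String) : keptA r false false true = r.erase "Italic" := by
  induction r with
  | nil => rfl
  | cons p rest ih =>
    by_cases h : p = "Italic"
    · simp [keptA, h, keptA_all_false]
    · simp [keptA, h, ih]

theorem keptA_bold_italic (r : List String) :
    keptA r false true true = (r.erase "Bold").erase "Italic" := by
  induction r with
  | nil => rfl
  | cons p rest ih =>
    by_cases hb : p = "Bold"
    · simp [keptA, hb, keptA_italic]
    · by_cases hi : p = "Italic"
      · simp [keptA, hi, keptA_bold]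
      · simp [keptA, hb, hi, ih]

theorem pvRemoveKw_eq_erase (l : List String) (kw : String) : pvRemoveKw l kw = l.erase kw := by
  unfold pvRemoveKw
  by_cases h : kw ∈ l
  · simp [h, PySem.List.remove?_eq_some_erase l kw h]
  · simp [h, List.erase_of_not_mem h]

theorem linked_eq (sn : String) (b i : Bool) :
    pvGetLinkedStyle sn b i =
      PySem.Str.join " "
        (((if b || i then (if b then ["Bold"] else []) ++ (if i then ["Italic"] else [])
           else ["Regular"]).foldl pvRemoveKw
          ((PySem.List.slice? (PySem.Str.split₀ sn) none none (-1)).getD [])).reverse) := by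
  unfold pvGetLinkedStyle
  rw [PySem.List.slice?_none_none_neg_one]
  rw [foldl_pvGLSStep]
  cases b <;> cases i <;>
    simp [List.foldl, pvRemoveKw_eq_erase, keptA_regular, keptA_bold, keptA_italic,
      keptA_bold_italic]

-- ===== VERDICT (by name: the statement is the Claim_ definition above) =====
theorem build_stylemap_names_spec : Claim_equal_build_stylemap_names := by
  intro fam sn b i ls _dom _pre
  unfold Spec_build_stylemap_names build_stylemap_names build_stylemap_names_alt
  rw [linked_eq]
  cases b <;> cases i <;> rfl
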